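-- pv_equiv track=rewrite | github.com/leifwritescode/Advent | event-24/17.12.2024.py | try_find_a
-- ===== SOURCE A (Python) =====
-- def run_one_cycle_of_program(a, b, c):
--     """
--     Runs a single execution of the program, without looping
--     outputs the state of the registers, and the value output by the program
--     """
--     b = a % 8
--     b = b ^ 1
--     c = a // (2 ** b)
--     b = b ^ 5
--     a = a // 8
--     b = b ^ c
--     return a, b, c, b % 8
--
-- def try_find_a(program, a = 0):
--     if len(program) == 0:
--         return a
--
--     for candidate in (a * 8 + bits for bits in range(8)):
--         _, _, _, x = run_one_cycle_of_program(candidate, 0, 0)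
--         if x == program[-1]:
--             val = try_find_a(program[:-1], candidate)
--             if val is None:
--                 continue
--             return val
-- ===== SOURCE B (Python) =====
-- def run_one_cycle_of_program(a, b, c):
--     b = a % 8
--     b = b ^ 1
--     c = a // (2 ** b)
--     b = b ^ 5
--     a = a // 8
--     b = b ^ c
--     return a, b, c, b % 8
--
-- def try_find_a(program, a = 0):
--     # Iterative breadth-first frontier search instead of DFS recursion:
--     # process the program's digits from the end, keeping every partial
--     # candidate that reproduces the suffix; the minimum survivor is the
--     # value the DFS would find first.
--     frontier = [a]
--     for digit in reversed(program):
--         frontier = [cand * 8 + bits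
--                     for cand in frontier
--                     for bits in range(8)
--                     if run_one_cycle_of_program(cand * 8 + bits, 0, 0)[3] == digit]
--     return min(frontier) if frontier else None
-- ===== Notes on version B (the rewrite author's own statement) =====
-- stated objective: alternative
-- what changed: Replaced the depth-first recursion with early return by an iterative breadth-first frontier over the program digits taken from the end, returning the minimum surviving candidate (which equals the first DFS hit since the frontier is built in increasing order).
import Mathlib
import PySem

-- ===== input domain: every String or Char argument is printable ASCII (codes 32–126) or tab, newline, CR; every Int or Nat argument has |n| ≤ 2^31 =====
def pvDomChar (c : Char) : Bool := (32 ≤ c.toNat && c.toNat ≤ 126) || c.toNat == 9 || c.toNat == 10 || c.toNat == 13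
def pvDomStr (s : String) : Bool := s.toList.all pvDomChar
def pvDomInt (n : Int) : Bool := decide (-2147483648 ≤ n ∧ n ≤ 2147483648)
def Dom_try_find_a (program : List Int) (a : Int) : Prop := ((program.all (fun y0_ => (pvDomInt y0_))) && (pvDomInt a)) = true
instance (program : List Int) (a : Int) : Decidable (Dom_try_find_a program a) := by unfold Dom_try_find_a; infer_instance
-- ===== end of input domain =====

-- B replaces A's depth-first recursion by an iterative breadth-first frontier over the
-- digits taken from the end, returning the minimum surviving candidate (objective: alternative).

-- ===== PORT A =====
def run_one_cycle_of_program (a b c : Int) : Int × Int × Int × Int :=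
  let b := PySem.Int.mod a 8
  let b := PySem.Int.bxor b 1
  -- 2 ** b : here b = (a % 8) ^ 1 ∈ [0,7], so Int exponentiation by b.toNat is exact
  let c := PySem.Int.floordiv a ((2 : Int) ^ b.toNat)
  let b := PySem.Int.bxor b 5
  let a := PySem.Int.floordiv a 8
  let b := PySem.Int.bxor b c
  (a, b, c, PySem.Int.mod b 8)

-- the 'for candidate in (a*8+bits for bits in range(8))' loop body of A
def tryLoopA (f : Int → Option Int) (last a : Int) (bits : List Int) : Option Int :=
  match bits with
  | [] => none                         -- loop falls through: Python returns None
  | b :: rest =>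
    let candidate := a * 8 + b
    let x := (run_one_cycle_of_program candidate 0 0).2.2.2
    if x = last then
      match f candidate with
      | none => tryLoopA f last a rest -- 'continue'
      | some v => some v               -- 'return val'
    else tryLoopA f last a rest

def try_find_a (program : List Int) (a : Int) : Option Int :=
  if h : program.length = 0 then some a
  else
    tryLoopA (fun candidate => try_find_a (PySem.List.slice program none (some (-1))) candidate)
      (PySem.List.pyGetD program (-1) 0)  -- program[-1]; program is nonempty here, so exact
      a (PySem.List.pyRange 0 8 1)
termination_by program.length
decreasing_by
  rw [PySem.List.slice_to_neg_one]
  simp [List.length_dropLast]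
  omega

-- ===== PORT B =====
def try_find_a_alt (program : List Int) (a : Int) : Option Int :=
  let frontier :=
    program.reverse.foldl
      (fun frontier digit =>
        frontier.flatMap (fun cand =>
          (PySem.List.pyRange 0 8 1).filterMap (fun bits =>
            if (run_one_cycle_of_program (cand * 8 + bits) 0 0).2.2.2 = digit then
              some (cand * 8 + bits)
            else none)))
      [a]
  -- 'min(frontier) if frontier else None'
  if frontier.isEmpty then none else PySem.List.min? frontier (fun x => x)

-- ===== PRECONDITION & SPEC =====
def Spec_try_find_a (program : List Int) (a : Int) (out : Option Int) : Prop := out = try_find_a_alt program a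
instance (program : List Int) (a : Int) (out : Option Int) : Decidable (Spec_try_find_a program a out) := by unfold Spec_try_find_a; infer_instance

-- ===== CLAIM (what is proved, stated in full; the proofs are below) =====
def Claim_equal_try_find_a : Prop := ∀ (program : List Int) (a : Int), Dom_try_find_a program a → Spec_try_find_a program a (try_find_a program a)

-- ===== LEMMAS AND PROOFS =====

-- children of a partial candidate for one digit (the filterMap appearing in B's fold step)
def pvChild (d cand : Int) : List Int :=
  (PySem.List.pyRange 0 8 1).filterMap (fun bits =>
    if (run_one_cycle_of_program (cand * 8 + bits) 0 0).2.2.2 = d then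
      some (cand * 8 + bits)
    else none)

-- all valid completions, digits given last-first, in DFS order
def pvResults : List Int → Int → List Int
  | [], a => [a]
  | d :: ds, a => (pvChild d a).flatMap (pvResults ds)

theorem pvChild_mem {d cand x : Int} (h : x ∈ pvChild d cand) :
    8 * cand ≤ x ∧ x < 8 * (cand + 1) := by
  unfold pvChild at h
  rcases List.mem_filterMap.mp h with ⟨b, hb, hx⟩
  rw [PySem.List.mem_pyRange_one] at hb
  split_ifs at hx with hc
  cases hx
  omega

theorem pvResults_bounds {ds : List Int} {a x : Int} (h : x ∈ pvResults ds a) :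
    (8 : Int) ^ ds.length * a ≤ x ∧ x < 8 ^ ds.length * (a + 1) := by
  induction ds generalizing a with
  | nil => simp only [pvResults, List.mem_singleton] at h; subst h; simp
  | cons d ds ih =>
    unfold pvResults at h
    rcases List.mem_flatMap.mp h with ⟨c, hc, hx⟩
    have hcb := pvChild_mem hc
    have hxb := ih hx
    have h8 : (0 : Int) < 8 ^ ds.length := by positivity
    constructor
    · calc (8 : Int) ^ (d :: ds).length * a = 8 ^ ds.length * (8 * a) := by
            simp [List.length_cons, pow_succ]; ring
        _ ≤ 8 ^ ds.length * c := by
            exact mul_le_mul_of_nonneg_left hcb.1 (le_of_lt h8)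
        _ ≤ x := hxb.1
    · calc x < 8 ^ ds.length * (c + 1) := hxb.2
        _ ≤ 8 ^ ds.length * (8 * (a + 1)) := by
            apply mul_le_mul_of_nonneg_left _ (le_of_lt h8); omega
        _ = 8 ^ (d :: ds).length * (a + 1) := by
            simp [List.length_cons, pow_succ]; ring

theorem pvChild_pairwise (d cand : Int) : (pvChild d cand).Pairwise (· < ·) := by
  unfold pvChild
  apply List.Pairwise.filterMap (R := (· < ·))
  · intro x y hxy u v hu hv
    split_ifs at hu hv <;> simp_all
    omega
  · have : PySem.List.pyRange 0 8 1 = [0, 1, 2, 3, 4, 5, 6, 7] := by decide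
    rw [this]; decide

theorem pvResults_pairwise (ds : List Int) (a : Int) : (pvResults ds a).Pairwise (· < ·) := by
  induction ds generalizing a with
  | nil => simp [pvResults]
  | cons d ds ih =>
    unfold pvResults
    rw [List.pairwise_flatMap]
    refine ⟨fun c _ => ih c, ?_⟩
    apply (pvChild_pairwise d a).imp_of_mem
    intro c c' hc hc' hlt x hx y hy
    have hxb := pvResults_bounds hx
    have hyb := pvResults_bounds hy
    have h8 : (0 : Int) < 8 ^ ds.length := by positivity
    have : (8 : Int) ^ ds.length * (c + 1) ≤ 8 ^ ds.length * c' := by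
      apply mul_le_mul_of_nonneg_left _ (le_of_lt h8); omega
    omega

-- B's fold computes pvResults
theorem pvFoldl_eq_results (ds : List Int) (fr : List Int) :
    ds.foldl
      (fun frontier digit =>
        frontier.flatMap (fun cand =>
          (PySem.List.pyRange 0 8 1).filterMap (fun bits =>
            if (run_one_cycle_of_program (cand * 8 + bits) 0 0).2.2.2 = digit then
              some (cand * 8 + bits)
            else none)))
      fr = fr.flatMap (fun c => pvResults ds c) := by
  induction ds generalizing fr with
  | nil => simp [pvResults]
  | cons d ds ih =>
    rw [List.foldl_cons, ih]
    show (fr.flatMap (pvChild d)).flatMap _ = _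
    rw [List.flatMap_assoc]
    rfl

-- A computes the head of pvResults (digits reversed)
theorem pvTryLoopA_spec (ds : List Int) (f : Int → Option Int)
    (hf : ∀ c, f c = (pvResults ds c).head?) (last a : Int) (bits : List Int) :
    tryLoopA f last a bits =
      ((bits.filterMap (fun b =>
          if (run_one_cycle_of_program (a * 8 + b) 0 0).2.2.2 = last then
            some (a * 8 + b)
          else none)).flatMap (pvResults ds)).head? := by
  induction bits with
  | nil => simp [tryLoopA]
  | cons b rest ih =>
    unfold tryLoopA
    simp only [List.filterMap_cons]
    split_ifs with hx
    · rw [hf (a * 8 + b)]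
      cases hres : pvResults ds (a * 8 + b) with
      | nil => simp only [List.flatMap_cons, hres, List.nil_append]; exact ih
      | cons v t => simp [List.flatMap_cons, hres]
    · exact ih

theorem pvA_eq_head (program : List Int) (a : Int) :
    try_find_a program a = (pvResults program.reverse a).head? := by
  by_cases h : program.length = 0
  · have : program = [] := List.eq_nil_of_length_eq_zero h
    subst this
    simp [try_find_a, pvResults]
  · rw [try_find_a]
    simp only [h, dite_false]
    have hne : program ≠ [] := by intro he; subst he; simp at h
    have hsplit : program = program.dropLast ++ [program.getLast hne] :=
      (List.dropLast_append_getLast hne).symm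
    have hrev : program.reverse = program.getLast hne :: program.dropLast.reverse := by
      conv_lhs => rw [hsplit]
      simp
    have hlast : PySem.List.pyGetD program (-1) 0 = program.getLast hne :=
      PySem.List.pyGetD_neg_one program 0 hne
    have hslice : PySem.List.slice program none (some (-1)) = program.dropLast :=
      PySem.List.slice_to_neg_one program
    rw [hlast, hrev,
      pvTryLoopA_spec program.dropLast.reverse _
        (fun c => by rw [hslice, pvA_eq_head program.dropLast c]) _ a]
    rfl
termination_by program.length
decreasing_by simp [List.length_dropLast]; omega

theorem pvFoldl_min_eq (x : Int) (t : List Int) (h : ∀ y ∈ t, x ≤ y) :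
    t.foldl min x = x := by
  induction t generalizing x with
  | nil => rfl
  | cons y t ih =>
    rw [List.foldl_cons, min_eq_left (h y (by simp))]
    exact ih x fun z hz => h z (by simp [hz])

-- min of a strictly sorted list is its head
theorem pvMin_sorted_eq_head (l : List Int) (hl : l.Pairwise (· < ·)) (hne : l.isEmpty = false) :
    PySem.List.min? l (fun x => x) = l.head? := by
  cases l with
  | nil => simp at hne
  | cons x t =>
    rw [PySem.List.min?_id_cons, List.head?_cons]
    have hx : ∀ y ∈ t, x ≤ y := fun y hy =>
      le_of_lt ((List.pairwise_cons.mp hl).1 y hy)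
    rw [pvFoldl_min_eq x t hx]

-- ===== VERDICT (by name: the statement is the Claim_ definition above) =====
theorem try_find_a_spec : Claim_equal_try_find_a := by
  intro program a _
  unfold Spec_try_find_a try_find_a_alt
  rw [pvFoldl_eq_results, List.flatMap_singleton, pvA_eq_head]
  show (pvResults program.reverse a).head? =
    if (pvResults program.reverse a).isEmpty = true then none
    else PySem.List.min? (pvResults program.reverse a) (fun x => x)
  rcases hres : pvResults program.reverse a with _ | ⟨x, t⟩
  · simp
  · have hp : (x :: t).Pairwise (· < ·) := hres ▸ pvResults_pairwise program.reverse a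
    rw [pvMin_sorted_eq_head _ hp rfl]
    simp
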